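-- pv_equiv track=rewrite | github.com/mfl42/cloud-connector-routing-adapter | hbr_vyos_adapter/translator.py | _infer_interface_type
-- ===== SOURCE A (Python) =====
-- def _infer_interface_type(interface: str) -> str | None:
--     prefixes = (
--         ("eth", "ethernet"),
--         ("en", "ethernet"),
--         ("bond", "bonding"),
--         ("br", "bridge"),
--         ("pppoe", "pppoe"),
--         ("dum", "dummy"),
--         ("veth", "virtual-ethernet"),
--         ("wg", "wireguard"),
--         ("vti", "vti"),
--         ("vxlan", "vxlan"),
--     )
--     for prefix, interface_type in prefixes:
--         if interface.startswith(prefix):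
--             return interface_type
--     return None
-- ===== SOURCE B (Python) =====
-- def _infer_interface_type(interface: str) -> str | None:
--     # Decision tree on the first character, then one literal slice comparison
--     # per surviving prefix (no loop over a prefix table).
--     if not interface:
--         return None
--     c0, rest = interface[0], interface[1:]
--     if c0 == "e":
--         if rest[:1] == "n" or rest[:2] == "th":
--             return "ethernet"
--     elif c0 == "b":
--         if rest[:3] == "ond":
--             return "bonding"
--         if rest[:1] == "r":
--             return "bridge"
--     elif c0 == "p":
--         if rest[:4] == "ppoe":
--             return "pppoe"
--     elif c0 == "d":
--         if rest[:2] == "um":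
--             return "dummy"
--     elif c0 == "v":
--         if rest[:3] == "eth":
--             return "virtual-ethernet"
--         if rest[:2] == "ti":
--             return "vti"
--         if rest[:4] == "xlan":
--             return "vxlan"
--     elif c0 == "w":
--         if rest[:1] == "g":
--             return "wireguard"
--     return None
-- ===== Notes on version B (the rewrite author's own statement) =====
-- stated objective: alternative
-- what changed: Replaces A's loop over a ten-entry (prefix, type) table with a loop-free decision tree: branch on the first character, then compare one literal slice per surviving prefix; correct because the prefixes sharing a first character are pairwise disjoint beyond it.
import Mathlib
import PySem

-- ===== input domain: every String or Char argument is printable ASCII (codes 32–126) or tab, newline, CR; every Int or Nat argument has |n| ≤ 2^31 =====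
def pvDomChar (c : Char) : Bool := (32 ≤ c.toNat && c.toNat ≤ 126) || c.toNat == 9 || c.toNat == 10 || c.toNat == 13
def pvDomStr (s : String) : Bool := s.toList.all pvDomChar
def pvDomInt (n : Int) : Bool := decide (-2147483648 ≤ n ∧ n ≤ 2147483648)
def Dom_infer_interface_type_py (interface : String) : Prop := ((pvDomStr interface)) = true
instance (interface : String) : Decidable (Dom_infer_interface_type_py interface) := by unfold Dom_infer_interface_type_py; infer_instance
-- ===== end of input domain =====

-- B replaces A's loop over a ten-entry prefix table by a loop-free decision tree on the
-- first character with one literal slice comparison per surviving prefix (objective: alternative).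

-- ===== PORT A =====
-- the tuple of (prefix, interface_type) pairs, in A's order
def pvPrefixesA : List (List Char × String) :=
  [(['e','t','h'], "ethernet"), (['e','n'], "ethernet"), (['b','o','n','d'], "bonding"),
   (['b','r'], "bridge"), (['p','p','p','o','e'], "pppoe"), (['d','u','m'], "dummy"),
   (['v','e','t','h'], "virtual-ethernet"), (['w','g'], "wireguard"),
   (['v','t','i'], "vti"), (['v','x','l','a','n'], "vxlan")]

-- the 'for prefix, interface_type in prefixes: if interface.startswith(prefix): return interface_type' loop
def pvScanA (cs : List Char) : List (List Char × String) → Option String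
  | [] => none
  | (p, t) :: rest => if PySem.Chars.startswith cs p then some t else pvScanA cs rest

def infer_interface_type_py (interface : String) : Option String :=
  pvScanA interface.toList pvPrefixesA

-- ===== PORT B =====
-- B's decision tree: empty check, split off interface[0] / interface[1:],
-- then branch on the first character and compare literal slices rest[:k].
def infer_interface_type_py_alt (interface : String) : Option String :=
  match interface.toList with
  | [] => none
  | c0 :: rest =>
    if c0 = 'e' then
      if PySem.List.slice rest none (some 1) = ['n'] ∨
         PySem.List.slice rest none (some 2) = ['t','h'] then some "ethernet" else none
    else if c0 = 'b' then
      if PySem.List.slice rest none (some 3) = ['o','n','d'] then some "bonding"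
      else if PySem.List.slice rest none (some 1) = ['r'] then some "bridge"
      else none
    else if c0 = 'p' then
      if PySem.List.slice rest none (some 4) = ['p','p','o','e'] then some "pppoe" else none
    else if c0 = 'd' then
      if PySem.List.slice rest none (some 2) = ['u','m'] then some "dummy" else none
    else if c0 = 'v' then
      if PySem.List.slice rest none (some 3) = ['e','t','h'] then some "virtual-ethernet"
      else if PySem.List.slice rest none (some 2) = ['t','i'] then some "vti"
      else if PySem.List.slice rest none (some 4) = ['x','l','a','n'] then some "vxlan"
      else none
    else if c0 = 'w' then
      if PySem.List.slice rest none (some 1) = ['g'] then some "wireguard" else none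
    else none

-- ===== PRECONDITION & SPEC =====
def Spec_infer_interface_type_py (interface : String) (out : Option String) : Prop := out = infer_interface_type_py_alt interface
instance (interface : String) (out : Option String) : Decidable (Spec_infer_interface_type_py interface out) := by unfold Spec_infer_interface_type_py; infer_instance

-- ===== CLAIM (what is proved, stated in full; the proofs are below) =====
def Claim_equal_infer_interface_type_py : Prop := ∀ (interface : String), Dom_infer_interface_type_py interface → Spec_infer_interface_type_py interface (infer_interface_type_py interface)

-- ===== LEMMAS AND PROOFS =====

-- rest[:k] == p (with p of length k) is the same test as p.isPrefixOf rest
theorem pv_slice_eq_iff (l p : List Char) :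
    PySem.List.slice l none (some (p.length : Int)) = p ↔ p <+: l := by
  rw [PySem.List.slice_to_natCast, List.prefix_iff_eq_take, eq_comm]


theorem pv_slice1 (l : List Char) (a : Char) :
    PySem.List.slice l none (some 1) = [a] ↔ [a] <+: l := by
  simpa using pv_slice_eq_iff l [a]

theorem pv_slice2 (l : List Char) (a b : Char) :
    PySem.List.slice l none (some 2) = [a, b] ↔ [a, b] <+: l := by
  simpa using pv_slice_eq_iff l [a, b]

theorem pv_slice3 (l : List Char) (a b c : Char) :
    PySem.List.slice l none (some 3) = [a, b, c] ↔ [a, b, c] <+: l := by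
  simpa using pv_slice_eq_iff l [a, b, c]

theorem pv_slice4 (l : List Char) (a b c d : Char) :
    PySem.List.slice l none (some 4) = [a, b, c, d] ↔ [a, b, c, d] <+: l := by
  simpa using pv_slice_eq_iff l [a, b, c, d]

-- startswith through a shared head character
theorem pv_startswith_cons (c : Char) (l p : List Char) :
    PySem.Chars.startswith (c :: l) (c :: p) = true ↔ p <+: l := by
  rw [PySem.Chars.startswith_iff, List.cons_prefix_cons]
  simp

theorem pv_startswith_cons_ne (c c' : Char) (h : c ≠ c') (l p : List Char) :
    PySem.Chars.startswith (c :: l) (c' :: p) = false := by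
  rw [Bool.eq_false_iff, Ne, PySem.Chars.startswith_iff, List.cons_prefix_cons]
  simp [h.symm]

theorem pv_main (interface : String) :
    infer_interface_type_py interface = infer_interface_type_py_alt interface := by
  unfold infer_interface_type_py infer_interface_type_py_alt
  cases h : interface.toList with
  | nil => simp [pvScanA, pvPrefixesA, PySem.Chars.startswith, List.isPrefixOf]
  | cons c0 rest =>
    simp only [pvScanA, pvPrefixesA]
    by_cases he : c0 = 'e'
    · subst he
      simp only [pv_slice1, pv_slice2, pv_slice3, pv_slice4,
            pv_startswith_cons_ne _ _ (by decide : 'e' ≠ 'b') rest,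
            pv_startswith_cons_ne _ _ (by decide : 'e' ≠ 'p') rest,
            pv_startswith_cons_ne _ _ (by decide : 'e' ≠ 'd') rest,
            pv_startswith_cons_ne _ _ (by decide : 'e' ≠ 'v') rest,
            pv_startswith_cons_ne _ _ (by decide : 'e' ≠ 'w') rest,
            pv_startswith_cons]
      by_cases h0 : ['t','h'] <+: rest <;> by_cases h1 : ['n'] <+: rest <;> simp [h0, h1]
    ·
      by_cases hb : c0 = 'b'
      · subst hb
        simp only [pv_slice1, pv_slice2, pv_slice3, pv_slice4,
              pv_startswith_cons_ne _ _ (by decide : 'b' ≠ 'e') rest,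
              pv_startswith_cons_ne _ _ (by decide : 'b' ≠ 'p') rest,
              pv_startswith_cons_ne _ _ (by decide : 'b' ≠ 'd') rest,
              pv_startswith_cons_ne _ _ (by decide : 'b' ≠ 'v') rest,
              pv_startswith_cons_ne _ _ (by decide : 'b' ≠ 'w') rest,
              pv_startswith_cons]
        by_cases h0 : ['o','n','d'] <+: rest <;> by_cases h1 : ['r'] <+: rest <;> simp [h0, h1]
      ·
        by_cases hp : c0 = 'p'
        · subst hp
          simp only [pv_slice1, pv_slice2, pv_slice3, pv_slice4,
                pv_startswith_cons_ne _ _ (by decide : 'p' ≠ 'e') rest,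
                pv_startswith_cons_ne _ _ (by decide : 'p' ≠ 'b') rest,
                pv_startswith_cons_ne _ _ (by decide : 'p' ≠ 'd') rest,
                pv_startswith_cons_ne _ _ (by decide : 'p' ≠ 'v') rest,
                pv_startswith_cons_ne _ _ (by decide : 'p' ≠ 'w') rest,
                pv_startswith_cons]
          by_cases h0 : ['p','p','o','e'] <+: rest <;> simp [h0]
        ·
          by_cases hd : c0 = 'd'
          · subst hd
            simp only [pv_slice1, pv_slice2, pv_slice3, pv_slice4,
                  pv_startswith_cons_ne _ _ (by decide : 'd' ≠ 'e') rest,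
                  pv_startswith_cons_ne _ _ (by decide : 'd' ≠ 'b') rest,
                  pv_startswith_cons_ne _ _ (by decide : 'd' ≠ 'p') rest,
                  pv_startswith_cons_ne _ _ (by decide : 'd' ≠ 'v') rest,
                  pv_startswith_cons_ne _ _ (by decide : 'd' ≠ 'w') rest,
                  pv_startswith_cons]
            by_cases h0 : ['u','m'] <+: rest <;> simp [h0]
          ·
            by_cases hv : c0 = 'v'
            · subst hv
              simp only [pv_slice1, pv_slice2, pv_slice3, pv_slice4,
                    pv_startswith_cons_ne _ _ (by decide : 'v' ≠ 'e') rest,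
                    pv_startswith_cons_ne _ _ (by decide : 'v' ≠ 'b') rest,
                    pv_startswith_cons_ne _ _ (by decide : 'v' ≠ 'p') rest,
                    pv_startswith_cons_ne _ _ (by decide : 'v' ≠ 'd') rest,
                    pv_startswith_cons_ne _ _ (by decide : 'v' ≠ 'w') rest,
                    pv_startswith_cons]
              by_cases h0 : ['e','t','h'] <+: rest <;> by_cases h1 : ['t','i'] <+: rest <;> by_cases h2 : ['x','l','a','n'] <+: rest <;> simp [h0, h1, h2]
            ·
              by_cases hw : c0 = 'w'
              · subst hw
                simp only [pv_slice1, pv_slice2, pv_slice3, pv_slice4,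
                      pv_startswith_cons_ne _ _ (by decide : 'w' ≠ 'e') rest,
                      pv_startswith_cons_ne _ _ (by decide : 'w' ≠ 'b') rest,
                      pv_startswith_cons_ne _ _ (by decide : 'w' ≠ 'p') rest,
                      pv_startswith_cons_ne _ _ (by decide : 'w' ≠ 'd') rest,
                      pv_startswith_cons_ne _ _ (by decide : 'w' ≠ 'v') rest,
                      pv_startswith_cons]
                by_cases h0 : ['g'] <+: rest <;> simp [h0]
              ·
                simp [
                      pv_startswith_cons_ne c0 'e' he rest ['t','h'],
                      pv_startswith_cons_ne c0 'e' he rest ['n'],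
                      pv_startswith_cons_ne c0 'b' hb rest ['o','n','d'],
                      pv_startswith_cons_ne c0 'b' hb rest ['r'],
                      pv_startswith_cons_ne c0 'p' hp rest ['p','p','o','e'],
                      pv_startswith_cons_ne c0 'd' hd rest ['u','m'],
                      pv_startswith_cons_ne c0 'v' hv rest ['e','t','h'],
                      pv_startswith_cons_ne c0 'w' hw rest ['g'],
                      pv_startswith_cons_ne c0 'v' hv rest ['t','i'],
                      pv_startswith_cons_ne c0 'v' hv rest ['x','l','a','n'],
                      he, hb, hp, hd, hv, hw]

-- ===== VERDICT (by name: the statement is the Claim_ definition above) =====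
theorem infer_interface_type_py_spec : Claim_equal_infer_interface_type_py := by
  intro interface _
  unfold Spec_infer_interface_type_py
  exact pv_main interface
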